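-- pv_equiv track=rewrite | github.com/slub/efre-lod-api | src/lod_api/apis/explore.py | _add_aggs
-- ===== SOURCE A (Python) =====
-- def _add_aggs(aggs):
--     """
--     merge a list of aggregations (i.e. dicts) by adding their values
--     if keys coincide
--     """
--     result = {}
--     for agg in aggs:
--         for k, v in agg.items():
--             if result.get(k):
--                 result[k] += v
--             else:
--                 result[k] = v
--     return result
-- ===== SOURCE B (Python) =====
-- def _add_aggs(aggs):
--     """Group values per key first, then sum each group (values are ints, so
--     Python's truthy-accumulator rule in A reduces to plain addition)."""
--     index = {}
--     for agg in aggs: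
--         for k, v in agg.items():
--             index.setdefault(k, []).append(v)
--     return {k: sum(vs) for k, vs in index.items()}
-- ===== Notes on version B (the rewrite author's own statement) =====
-- stated objective: alternative
-- what changed: Instead of one incremental accumulator dict with a truthiness branch, B first builds a grouping index mapping each key to the ordered list of all its values and then sums each group in a second pass (on int values A's overwrite-when-falsy rule is plain addition).
import Mathlib
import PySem

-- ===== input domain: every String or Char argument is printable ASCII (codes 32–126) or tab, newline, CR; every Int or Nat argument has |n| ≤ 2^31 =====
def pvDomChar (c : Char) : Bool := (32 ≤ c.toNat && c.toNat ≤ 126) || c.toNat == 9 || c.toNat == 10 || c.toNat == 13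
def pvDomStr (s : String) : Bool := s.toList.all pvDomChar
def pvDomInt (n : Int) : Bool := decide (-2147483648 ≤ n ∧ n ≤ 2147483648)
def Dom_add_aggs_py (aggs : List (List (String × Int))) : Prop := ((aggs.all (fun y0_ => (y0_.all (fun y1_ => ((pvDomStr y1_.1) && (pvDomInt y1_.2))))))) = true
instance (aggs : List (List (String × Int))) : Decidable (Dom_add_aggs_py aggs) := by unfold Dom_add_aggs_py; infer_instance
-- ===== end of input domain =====

-- B groups every key's values into a list in one pass and then sums each group;
-- on int values Python's truthy-accumulator rule of A is plain addition, so the results coincide.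

-- ===== PORT A =====
-- one incremental dict: if result.get(k): result[k] += v else: result[k] = v
def add_aggs_py (aggs : List (List (String × Int))) : List (String × Int) :=
  (aggs.foldl
    (fun result agg =>
      agg.foldl
        (fun result kv =>
          match result.get? kv.1 with          -- result.get(k): truthy iff present and ≠ 0
          | some x => if x ≠ 0 then result.insert kv.1 (x + kv.2) else result.insert kv.1 kv.2
          | none => result.insert kv.1 kv.2)
        result)
    PySem.Dict.empty).items

-- ===== PORT B =====
-- pass 1: index[k] = ordered list of all values seen for k; pass 2: {k: sum(vs)}
def add_aggs_py_alt (aggs : List (List (String × Int))) : List (String × Int) :=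
  let index : PySem.Dict String (List Int) :=
    aggs.foldl
      (fun index agg =>
        agg.foldl (fun index kv => index.modify kv.1 [] (· ++ [kv.2])) index)  -- setdefault(k, []).append(v)
      PySem.Dict.empty
  index.items.map (fun p => (p.1, p.2.sum))

-- ===== PRECONDITION & SPEC =====
def Spec_add_aggs_py (aggs : List (List (String × Int))) (out : List (String × Int)) : Prop := out = add_aggs_py_alt aggs
instance (aggs : List (List (String × Int))) (out : List (String × Int)) : Decidable (Spec_add_aggs_py aggs out) := by unfold Spec_add_aggs_py; infer_instance

-- ===== CLAIM (what is proved, stated in full; the proofs are below) =====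
def Claim_equal_add_aggs_py : Prop := ∀ (aggs : List (List (String × Int))), Dom_add_aggs_py aggs → Spec_add_aggs_py aggs (add_aggs_py aggs)

-- ===== LEMMAS AND PROOFS =====

-- summing a grouped entry, the relation between the two dicts
def pvSum (p : String × List Int) : String × Int := (p.1, p.2.sum)

theorem get?_mk_map_sum (l : List (String × List Int)) (k : String) :
    (PySem.Dict.mk (l.map pvSum)).get? k = ((PySem.Dict.mk l).get? k).map List.sum := by
  induction l with
  | nil => rfl
  | cons p t ih =>
      obtain ⟨pk, pv⟩ := p
      by_cases h : pk == k <;>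
        simp [PySem.Dict.get?_mk_cons, pvSum, h, ih]

-- A's branch collapses: on ints, "add if truthy else overwrite" is "add to getD k 0"
theorem stepA_eq (d : PySem.Dict String Int) (kv : String × Int) :
    (match d.get? kv.1 with
     | some x => if x ≠ 0 then d.insert kv.1 (x + kv.2) else d.insert kv.1 kv.2
     | none => d.insert kv.1 kv.2) = d.insert kv.1 (d.getD kv.1 0 + kv.2) := by
  cases h : d.get? kv.1 with
  | none => simp [PySem.Dict.getD_eq_get?_getD, h]
  | some x =>
      by_cases hx : x = 0 <;>
        simp [PySem.Dict.getD_eq_get?_getD, h, hx]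

theorem step_core (idx : PySem.Dict String (List Int)) (kv : String × Int) :
    (PySem.Dict.mk (idx.items.map pvSum)).insert kv.1
        ((PySem.Dict.mk (idx.items.map pvSum)).getD kv.1 0 + kv.2)
      = PySem.Dict.mk ((idx.modify kv.1 [] (· ++ [kv.2])).items.map pvSum) := by
  have hmod : idx.modify kv.1 [] (· ++ [kv.2]) = idx.insert kv.1 (idx.getD kv.1 [] ++ [kv.2]) := rfl
  set D : PySem.Dict String Int := PySem.Dict.mk (idx.items.map pvSum) with hDdef
  have hget : ∀ k, D.get? k = (idx.get? k).map List.sum := fun k => get?_mk_map_sum idx.items k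
  have hcont : D.contains kv.1 = idx.contains kv.1 := by
    rw [PySem.Dict.contains_eq_isSome_get?, PySem.Dict.contains_eq_isSome_get?, hget]
    cases idx.get? kv.1 <;> rfl
  apply PySem.Dict.ext
  cases hc : idx.contains kv.1 with
  | false =>
      rw [hmod, PySem.Dict.items_insert_of_not_contains _ _ (by rw [hcont]; exact hc),
          PySem.Dict.items_insert_of_not_contains _ _ hc]
      have h0 : D.getD kv.1 0 = 0 := PySem.Dict.getD_of_not_contains _ _ (by rw [hcont]; exact hc)
      have h1 : idx.getD kv.1 [] = [] := PySem.Dict.getD_of_not_contains _ _ hc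
      rw [h0, h1]
      simp [pvSum, hDdef]
  | true =>
      rw [hmod, PySem.Dict.items_insert_of_contains _ _ (by rw [hcont]; exact hc),
          PySem.Dict.items_insert_of_contains _ _ hc]
      obtain ⟨vs, hvs⟩ : ∃ vs, idx.get? kv.1 = some vs := by
        have := PySem.Dict.contains_eq_isSome_get? (d := idx) (k := kv.1)
        rw [hc] at this
        cases h : idx.get? kv.1 with
        | none => rw [h] at this; simp at this
        | some vs => exact ⟨vs, rfl⟩
      have hDv : D.getD kv.1 0 = vs.sum := by
        rw [PySem.Dict.getD_eq_get?_getD, hget, hvs]; rfl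
      have hIv : idx.getD kv.1 [] = vs := by
        rw [PySem.Dict.getD_eq_get?_getD, hvs]; rfl
      have : D.items = idx.items.map pvSum := rfl
      rw [this, List.map_map, List.map_map]
      apply List.map_congr_left
      intro p _
      by_cases hpk : (p.1 == kv.1) <;>
        simp [Function.comp, pvSum, hpk, hDv, hIv]

-- folding the flattened item stream preserves the grouping relation
theorem fold_rel (l : List (String × Int)) (idx : PySem.Dict String (List Int)) :
    l.foldl (fun d kv => d.insert kv.1 (d.getD kv.1 0 + kv.2))
        (PySem.Dict.mk (idx.items.map pvSum))
      = PySem.Dict.mk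
          ((l.foldl (fun index kv => index.modify kv.1 [] (· ++ [kv.2])) idx).items.map pvSum) := by
  induction l generalizing idx with
  | nil => rfl
  | cons kv t ih =>
      simp only [List.foldl_cons]
      rw [step_core, ih]

-- ===== VERDICT (by name: the statement is the Claim_ definition above) =====
theorem add_aggs_py_spec : Claim_equal_add_aggs_py := by
  intro aggs _
  unfold Spec_add_aggs_py add_aggs_py add_aggs_py_alt
  have hA : (fun (result : PySem.Dict String Int) (kv : String × Int) =>
      match result.get? kv.1 with
      | some x => if x ≠ 0 then result.insert kv.1 (x + kv.2) else result.insert kv.1 kv.2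
      | none => result.insert kv.1 kv.2)
      = fun d kv => d.insert kv.1 (d.getD kv.1 0 + kv.2) := by
    funext d kv; exact stepA_eq d kv
  rw [hA, ← List.foldl_flatten, ← List.foldl_flatten]
  have h2 : List.foldl (fun d kv => d.insert kv.1 (d.getD kv.1 0 + kv.2)) PySem.Dict.empty aggs.flatten
      = PySem.Dict.mk ((aggs.flatten.foldl (fun index kv => index.modify kv.1 [] (· ++ [kv.2])) PySem.Dict.empty).items.map pvSum) :=
    fold_rel aggs.flatten PySem.Dict.empty
  rw [h2]
  simp [pvSum]
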